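-- pv_equiv track=rewrite | github.com/ayoubzulfiqar/Leetcode-Medium | FindtheMaximumLengthofValidSubsequenceII/find_the_maximum_length_of_valid_subsequence_ii.py | longestValidSubsequence
-- ===== SOURCE A (Python) =====
-- def longestValidSubsequence(nums: list[int], k: int) -> int:
--     n = len(nums)
--     dp = [{} for _ in range(n)]
--     max_length = 1
--     for i in range(n):
--         current_num = nums[i]
--         for j in range(i):
--             prev_num = nums[j]
--             rem = (prev_num + current_num) % k
--             if rem in dp[j]:
--                 length = dp[j][rem] + 1
--             else:
--                 length = 2
--             dp[i][rem] = max(dp[i].get(rem, 0), length)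
--             max_length = max(max_length, dp[i][rem])
--     return max_length
-- ===== SOURCE B (Python) =====
-- def longestValidSubsequence(nums: list[int], k: int) -> int:
--     # DP over residues: best[(rem, m)] = longest valid chain whose adjacent sums
--     # are ≡ rem (mod k) and whose last element is ≡ m (mod k).
--     best = {}
--     seen = []  # distinct residues of elements seen so far, in first-seen order
--     for x in nums:
--         m = x % k
--         for p in seen:
--             rem = (p + m) % k
--             cand = best.get((rem, p), 1) + 1
--             key = (rem, m)
--             if cand > best.get(key, 0):
--                 best[key] = cand
--         if m not in seen:
--             seen.append(m)
--     return max(best.values(), default=1)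
-- ===== Notes on version B (the rewrite author's own statement) =====
-- stated objective: faster
-- what changed: A compares every pair (j,i) and keeps a per-index dict dp[i][rem]; B keeps one DP table keyed by (pair-sum residue, residue of last element) plus the set of residues seen, so each element is combined with at most min(n,|k|) distinct residues instead of with every earlier index.
-- outside the precondition, e.g. on longestValidSubsequence([], 0): A returns 1, B returns 1; on longestValidSubsequence([5], 0): A returns 1, B raises ZeroDivisionError
import Mathlib
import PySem

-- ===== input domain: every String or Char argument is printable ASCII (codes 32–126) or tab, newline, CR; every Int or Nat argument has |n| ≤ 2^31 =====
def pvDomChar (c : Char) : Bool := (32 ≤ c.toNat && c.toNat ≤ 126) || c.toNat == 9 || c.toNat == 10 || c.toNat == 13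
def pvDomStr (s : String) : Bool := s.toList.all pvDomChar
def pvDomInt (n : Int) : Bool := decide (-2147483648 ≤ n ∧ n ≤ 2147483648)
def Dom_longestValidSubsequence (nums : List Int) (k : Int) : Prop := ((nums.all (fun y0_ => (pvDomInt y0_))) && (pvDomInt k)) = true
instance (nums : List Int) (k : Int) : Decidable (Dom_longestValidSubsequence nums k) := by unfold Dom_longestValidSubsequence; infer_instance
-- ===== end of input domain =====

-- B replaces A's O(n²) all-pairs scan by a DP over residue classes: one dictionary keyed by
-- (pair-sum residue, residue of the last element), updated once per element per seen residue.

-- ===== PORT A =====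
-- inner loop body of A: state = (dp, max_length), iterating j over range(i)
def pvInnerA (nums : List Int) (k i currentNum : Int)
    (st : List (PySem.Dict Int Int) × Int) (j : Int) : List (PySem.Dict Int Int) × Int :=
  let prevNum := PySem.List.pyGetD nums j 0          -- nums[j] (j always in range here)
  let rem := PySem.Int.mod (prevNum + currentNum) k
  let dpj := PySem.List.pyGetD st.1 j PySem.Dict.empty   -- dp[j]
  let length := match dpj.get? rem with
    | some v => v + 1
    | none => 2
  let dpi := PySem.List.pyGetD st.1 i PySem.Dict.empty   -- dp[i]
  let newv := max (dpi.getD rem 0) length                 -- dp[i][rem] = max(dp[i].get(rem,0), length)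
  (st.1.set i.toNat (dpi.insert rem newv), max st.2 newv) -- max_length = max(max_length, dp[i][rem])

-- outer loop body of A: i over range(n)
def pvOuterA (nums : List Int) (k : Int)
    (st : List (PySem.Dict Int Int) × Int) (i : Int) : List (PySem.Dict Int Int) × Int :=
  let currentNum := PySem.List.pyGetD nums i 0        -- nums[i]
  (PySem.List.pyRange 0 i).foldl (pvInnerA nums k i currentNum) st

def longestValidSubsequence (nums : List Int) (k : Int) : Int :=
  let n : Int := (nums.length : Int)
  let dp0 := (PySem.List.pyRange 0 n).map (fun _ => (PySem.Dict.empty : PySem.Dict Int Int))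
  ((PySem.List.pyRange 0 n).foldl (pvOuterA nums k) (dp0, 1)).2

-- ===== PORT B =====
-- inner loop body of B: for p in seen
def pvInnerB (k m : Int) (best : PySem.Dict (Int × Int) Int) (p : Int) : PySem.Dict (Int × Int) Int :=
  let rem := PySem.Int.mod (p + m) k
  let cand := best.getD (rem, p) 1 + 1
  if best.getD (rem, m) 0 < cand then best.insert (rem, m) cand else best

-- outer loop body of B: for x in nums
def pvOuterB (k : Int) (st : PySem.Dict (Int × Int) Int × PySem.Set Int) (x : Int) :
    PySem.Dict (Int × Int) Int × PySem.Set Int :=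
  let m := PySem.Int.mod x k
  (st.2.foldl (pvInnerB k m) st.1, PySem.Set.add st.2 m)

def longestValidSubsequence_alt (nums : List Int) (k : Int) : Int :=
  let st := nums.foldl (pvOuterB k) (PySem.Dict.empty, PySem.Set.empty)
  PySem.List.maxD st.1.values (fun v => v) 1          -- max(best.values(), default=1)

-- ===== PRECONDITION & SPEC =====
-- Pre_ excludes k = 0: Python A raises ZeroDivisionError there as soon as two elements are
-- paired; on the remaining degenerate k = 0 inputs (fewer than two elements) A returns 1
-- without touching the modulus, while B's natural algorithm reduces each element mod k and
-- so raises on any nonempty list; no value is claimed at k = 0.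
def Pre_longestValidSubsequence (nums : List Int) (k : Int) : Prop := k ≠ 0
instance (nums : List Int) (k : Int) : Decidable (Pre_longestValidSubsequence nums k) := by
  unfold Pre_longestValidSubsequence; infer_instance

def pvWitness_longestValidSubsequence : List Int × Int := ([1, 4, 2, 3, 2, 4, 1], 3)

def Spec_longestValidSubsequence (nums : List Int) (k : Int) (out : Int) : Prop := out = longestValidSubsequence_alt nums k
instance (nums : List Int) (k : Int) (out : Int) : Decidable (Spec_longestValidSubsequence nums k out) := by unfold Spec_longestValidSubsequence; infer_instance

-- ===== CLAIM (what is proved, stated in full; the proofs are below) =====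
def Claim_equal_longestValidSubsequence : Prop := ∀ (nums : List Int) (k : Int), Dom_longestValidSubsequence nums k → Pre_longestValidSubsequence nums k → Spec_longestValidSubsequence nums k (longestValidSubsequence nums k)


-- ===== LEMMAS AND PROOFS =====

-- ---- abbreviations used only by the proofs ----
-- model of A's loop: state (pairs, mx) where pairs pairs each processed element with its dict
def mInner (k x : Int) (st : PySem.Dict Int Int × Int) (q : Int × PySem.Dict Int Int) :
    PySem.Dict Int Int × Int :=
  let rem := PySem.Int.mod (q.1 + x) k
  let len := match q.2.get? rem with
    | some v => v + 1
    | none => 2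
  let nv := max (st.1.getD rem 0) len
  (st.1.insert rem nv, max st.2 nv)

def mOuter (k : Int) (st : List (Int × PySem.Dict Int Int) × Int) (x : Int) :
    List (Int × PySem.Dict Int Int) × Int :=
  let r := st.1.foldl (mInner k x) (PySem.Dict.empty, st.2)
  (st.1 ++ [(x, r.1)], r.2)

def mPairs (k : Int) (xs : List Int) : List (Int × PySem.Dict Int Int) :=
  (xs.foldl (mOuter k) ([], 1)).1
def mMax (k : Int) (xs : List Int) : Int := (xs.foldl (mOuter k) ([], 1)).2
def bBest (k : Int) (xs : List Int) : PySem.Dict (Int × Int) Int :=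
  (xs.foldl (pvOuterB k) (PySem.Dict.empty, PySem.Set.empty)).1
def bSeen (k : Int) (xs : List Int) : PySem.Set Int :=
  (xs.foldl (pvOuterB k) (PySem.Dict.empty, PySem.Set.empty)).2

-- dict-only version of A's inner loop
def dLen (k x : Int) (q : Int × PySem.Dict Int Int) : Int :=
  match q.2.get? (PySem.Int.mod (q.1 + x) k) with
  | some v => v + 1
  | none => 2
def dStep (k x : Int) (d : PySem.Dict Int Int) (q : Int × PySem.Dict Int Int) :
    PySem.Dict Int Int :=
  d.insert (PySem.Int.mod (q.1 + x) k)
    (max (d.getD (PySem.Int.mod (q.1 + x) k) 0) (dLen k x q))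

-- best chain length with pair-residue r among processed elements whose own residue is p (1 if none)
def bval (k : Int) (pairs : List (Int × PySem.Dict Int Int)) (r p : Int) : Int :=
  (pairs.filter (fun q => PySem.Int.mod q.1 k == p)).foldl
    (fun a q => max a (q.2.getD r 1)) 1

def vsup (l : List Int) : Int := l.foldl max 1
def dsup (d : PySem.Dict Int Int) : Int := vsup d.values

def pvInv (k : Int) (xs : List Int) : Prop :=
  (mPairs k xs).map Prod.fst = xs ∧
  bSeen k xs = PySem.Set.ofList (xs.map (fun x => PySem.Int.mod x k)) ∧
  (∀ r p, (bBest k xs).getD (r, p) 1 = bval k (mPairs k xs) r p) ∧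
  mMax k xs = (mPairs k xs).foldl (fun a q => max a (dsup q.2)) 1 ∧
  (∀ q ∈ mPairs k xs, (∀ v ∈ q.2.values, 2 ≤ v) ∧ q.2.keys.Nodup) ∧
  (∀ v ∈ (bBest k xs).values, 2 ≤ v) ∧
  (bBest k xs).keys.Nodup

-- ---- arithmetic lemmas about Python's % ----
theorem pmod_dvd_sub (k a : Int) : k ∣ a - PySem.Int.mod a k := by
  refine ⟨PySem.Int.floordiv a k, ?_⟩
  have h := PySem.Int.floordiv_mul_add_mod a k
  linarith [h]

theorem pmod_congr {k a b : Int} (hk : k ≠ 0) (h : k ∣ a - b) :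
    PySem.Int.mod a k = PySem.Int.mod b k := by
  have h1 := pmod_dvd_sub k a
  have h2 := pmod_dvd_sub k b
  have hd : k ∣ PySem.Int.mod a k - PySem.Int.mod b k := by
    have he : PySem.Int.mod a k - PySem.Int.mod b k = (a - b) - (a - PySem.Int.mod a k) + (b - PySem.Int.mod b k) := by ring
    rw [he]; exact dvd_add (dvd_sub h h1) h2
  have hz : PySem.Int.mod a k - PySem.Int.mod b k = 0 := by
    rcases lt_or_gt_of_ne hk with hneg | hpos
    · apply Int.eq_zero_of_abs_lt_dvd (Int.neg_dvd.mpr hd)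
      have b1 := PySem.Int.mod_neg_bounds a hneg
      have b2 := PySem.Int.mod_neg_bounds b hneg
      rw [abs_lt]; omega
    · apply Int.eq_zero_of_abs_lt_dvd hd
      have b1 := PySem.Int.mod_nonneg a hpos
      have b2 := PySem.Int.mod_nonneg b hpos
      have c1 := PySem.Int.mod_lt a hpos
      have c2 := PySem.Int.mod_lt b hpos
      rw [abs_lt]; omega
  omega

theorem pmod_idem (k a : Int) (hk : k ≠ 0) :
    PySem.Int.mod (PySem.Int.mod a k) k = PySem.Int.mod a k := by
  apply pmod_congr hk
  have he : PySem.Int.mod a k - a = -(a - PySem.Int.mod a k) := by ring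
  rw [he]; exact dvd_neg.mpr (pmod_dvd_sub k a)

theorem pmod_add_left (k a b : Int) (hk : k ≠ 0) :
    PySem.Int.mod (PySem.Int.mod a k + b) k = PySem.Int.mod (a + b) k := by
  apply pmod_congr hk
  have : PySem.Int.mod a k + b - (a + b) = -(a - PySem.Int.mod a k) := by ring
  rw [this]; exact dvd_neg.mpr (pmod_dvd_sub k a)

theorem pmod_unique {k p m r : Int} (hk : k ≠ 0) (hp : PySem.Int.mod p k = p)
    (h : PySem.Int.mod (p + m) k = r) : p = PySem.Int.mod (r - m) k := by
  have hd : k ∣ (p + m) - r := by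
    have := pmod_dvd_sub k (p + m); rwa [h] at this
  have : PySem.Int.mod p k = PySem.Int.mod (r - m) k := by
    apply pmod_congr hk
    have he : p - (r - m) = (p + m) - r := by ring
    rw [he]; exact hd
  rwa [hp] at this

-- ---- small fold/max lemmas ----
theorem foldl_max_le {α : Type} (l : List α) (g : α → Int) (c m : Int)
    (hc : c ≤ m) (hg : ∀ q ∈ l, g q ≤ m) :
    l.foldl (fun a q => max a (g q)) c ≤ m := by
  induction l generalizing c with
  | nil => simpa using hc
  | cons a t ih =>
    simp only [List.foldl_cons]
    exact ih _ (by have := hg a (by simp); omega) (fun q hq => hg q (by simp [hq]))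

theorem foldl_max_seed {α : Type} (l : List α) (g : α → Int) (s t : Int)
    (hst : s ≤ t) (h : ∀ q ∈ l, t ≤ g q) (hne : l ≠ []) :
    l.foldl (fun a q => max a (g q)) s = l.foldl (fun a q => max a (g q)) t := by
  cases l with
  | nil => exact absurd rfl hne
  | cons a r =>
    simp only [List.foldl_cons]
    have ha := h a (by simp)
    have h1 : max s (g a) = g a := by omega
    have h2 : max t (g a) = g a := by omega
    rw [h1, h2]

theorem foldl_max_add_one {α : Type} (l : List α) (g : α → Int) (c : Int) :
    l.foldl (fun a q => max a (g q + 1)) (c + 1)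
      = l.foldl (fun a q => max a (g q)) c + 1 := by
  induction l generalizing c with
  | nil => simp
  | cons a t ih =>
    simp only [List.foldl_cons]
    have h1 : max (c + 1) (g a + 1) = max c (g a) + 1 := by omega
    rw [h1, ih]

theorem vsup_append (l : List Int) (a : Int) : vsup (l ++ [a]) = max (vsup l) a := by
  unfold vsup
  rw [List.foldl_append]
  simp

theorem one_le_vsup (l : List Int) : 1 ≤ vsup l := (PySem.List.le_foldl_max l 1).1

theorem mem_le_vsup {l : List Int} {v : Int} (h : v ∈ l) : v ≤ vsup l :=
  (PySem.List.le_foldl_max l 1).2 v h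

theorem foldl_max_out (l : List Int) (s a : Int) :
    l.foldl max (max s a) = max (l.foldl max s) a := by
  induction l generalizing s with
  | nil => simp
  | cons b t ih =>
    simp only [List.foldl_cons]
    rw [show max (max s a) b = max (max s b) a by omega, ih]

theorem vsup_cons (a : Int) (l : List Int) : vsup (a :: l) = max (vsup l) a := by
  unfold vsup
  simp only [List.foldl_cons]
  exact foldl_max_out l 1 a

theorem vsup_map_update {l : List Int} (hnd : l.Nodup) {r : Int} (hr : r ∈ l)
    (f g : Int → Int) (v : Int) (hg : ∀ x ∈ l, x ≠ r → g x = f x) (hgr : g r = v)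
    (hfr : f r ≤ v) :
    vsup (l.map g) = max (vsup (l.map f)) v := by
  induction l with
  | nil => simp at hr
  | cons a t ih =>
    rcases List.nodup_cons.mp hnd with ⟨hna, hnt⟩
    by_cases hb : a = r
    · subst hb
      have hmapeq : t.map g = t.map f := by
        apply List.map_congr_left
        intro x hx
        exact hg x (by simp [hx]) (fun hxr => hna (hxr ▸ hx))
      simp only [List.map_cons]
      rw [vsup_cons, vsup_cons, hmapeq, hgr]
      omega
    · have hrt : r ∈ t := by
        rcases List.mem_cons.mp hr with h | h
        · exact absurd h.symm hb
        · exact h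
      have := ih hnt hrt (fun x hx hxr => hg x (by simp [hx]) hxr)
      simp only [List.map_cons]
      rw [vsup_cons, vsup_cons, this, hg a (by simp) hb]
      omega

-- ---- dict value helpers ----
theorem value_of_get? {κ : Type} [BEq κ] [LawfulBEq κ] (d : PySem.Dict κ Int) {x : κ} {v : Int}
    (h : d.get? x = some v) : v ∈ d.values := by
  have hm := PySem.Dict.mem_items_of_get?_eq_some d h
  simp only [PySem.Dict.values]
  exact List.mem_map.mpr ⟨(x, v), hm, rfl⟩

theorem values_exists_key {κ : Type} [BEq κ] [LawfulBEq κ] (d : PySem.Dict κ Int)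
    (hnd : d.keys.Nodup) {v : Int} (h : v ∈ d.values) : ∃ x, d.getD x 1 = v := by
  simp only [PySem.Dict.values] at h
  rcases List.mem_map.mp h with ⟨⟨x, w⟩, hm, hw⟩
  exact ⟨x, by rw [PySem.Dict.getD_of_mem_items d hm hnd 1]; exact hw⟩

theorem getD1_ge_one {κ : Type} [BEq κ] [LawfulBEq κ] (d : PySem.Dict κ Int)
    (hv : ∀ v ∈ d.values, 1 ≤ v) (x : κ) : 1 ≤ d.getD x 1 := by
  rw [PySem.Dict.getD_eq_get?_getD]
  cases hq : d.get? x with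
  | none => simp
  | some v => simpa using hv v (value_of_get? d hq)

theorem getD1_le_vsup {κ : Type} [BEq κ] [LawfulBEq κ] (d : PySem.Dict κ Int) (x : κ) :
    d.getD x 1 ≤ vsup d.values := by
  rw [PySem.Dict.getD_eq_get?_getD]
  cases hq : d.get? x with
  | none => simpa using one_le_vsup d.values
  | some v => simpa using mem_le_vsup (value_of_get? d hq)

theorem getD0_eq_getD1 {κ : Type} [BEq κ] [LawfulBEq κ] (d : PySem.Dict κ Int) (x : κ)
    (h : d.contains x = true) : d.getD x 0 = d.getD x 1 := by
  rw [PySem.Dict.getD_eq_get?_getD, PySem.Dict.getD_eq_get?_getD]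
  rw [PySem.Dict.contains_eq_isSome_get?] at h
  cases hq : d.get? x with
  | none => rw [hq] at h; simp at h
  | some v => simp

theorem dsup_insert (d : PySem.Dict Int Int) (hnd : d.keys.Nodup) (r v : Int)
    (hv : d.getD r 0 ≤ v) :
    dsup (d.insert r v) = max (dsup d) v := by
  have hnd' : (d.insert r v).keys.Nodup := PySem.Dict.nodup_keys_insert d r v hnd
  unfold dsup
  rw [PySem.Dict.values_eq_map_keys d hnd 1, PySem.Dict.values_eq_map_keys _ hnd' 1]
  by_cases hc : d.contains r = true
  · rw [PySem.Dict.keys_insert_of_contains d v hc]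
    apply vsup_map_update hnd ((PySem.Dict.contains_iff_mem_keys d r).mp hc)
    · intro x _ hxr
      rw [PySem.Dict.getD_insert]
      simp [hxr]
    · rw [PySem.Dict.getD_insert]; simp
    · rw [← getD0_eq_getD1 d r hc]; exact hv
  · rw [PySem.Dict.keys_insert_of_not_contains d v (by simpa using hc)]
    rw [List.map_append]
    have hmap : d.keys.map (fun x => (d.insert r v).getD x 1) = d.keys.map (fun x => d.getD x 1) := by
      apply List.map_congr_left
      intro x hx
      rw [PySem.Dict.getD_insert]
      have : x ≠ r := fun hxr => hc ((PySem.Dict.contains_iff_mem_keys d r).mpr (hxr ▸ hx))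
      simp [this]
    rw [hmap]
    simp only [List.map_cons, List.map_nil]
    rw [PySem.Dict.getD_insert, if_pos rfl]
    exact vsup_append _ v

-- ---- A-model inner-loop lemmas ----
theorem dLen_eq (k x : Int) (q : Int × PySem.Dict Int Int) :
    dLen k x q = q.2.getD (PySem.Int.mod (q.1 + x) k) 1 + 1 := by
  unfold dLen
  rw [PySem.Dict.getD_eq_get?_getD]
  cases hq : q.2.get? (PySem.Int.mod (q.1 + x) k) <;> simp

theorem mInner_fst (k x : Int) (l : List (Int × PySem.Dict Int Int))
    (di : PySem.Dict Int Int) (mx : Int) :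
    (l.foldl (mInner k x) (di, mx)).1 = l.foldl (dStep k x) di := by
  induction l generalizing di mx with
  | nil => rfl
  | cons q t ih =>
    simp only [List.foldl_cons]
    rw [show mInner k x (di, mx) q = (dStep k x di q, (mInner k x (di, mx) q).2) from rfl]
    exact ih _ _

theorem dStep_getD0_mono (k x : Int) (l : List (Int × PySem.Dict Int Int))
    (d : PySem.Dict Int Int) (r : Int) :
    d.getD r 0 ≤ (l.foldl (dStep k x) d).getD r 0 := by
  induction l generalizing d with
  | nil => simp
  | cons q t ih =>
    simp only [List.foldl_cons]
    refine le_trans ?_ (ih (dStep k x d q))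
    unfold dStep
    by_cases hr : r = PySem.Int.mod (q.1 + x) k
    · subst hr
      rw [PySem.Dict.getD_insert_self]
      exact le_max_left _ _
    · rw [PySem.Dict.getD_insert_of_ne _ _ _ hr]

theorem dStep_nodup (k x : Int) (l : List (Int × PySem.Dict Int Int))
    (d : PySem.Dict Int Int) (h : d.keys.Nodup) :
    (l.foldl (dStep k x) d).keys.Nodup := by
  exact PySem.Dict.nodup_keys_foldl_insert_key l
    (fun q => PySem.Int.mod (q.1 + x) k)
    (fun d q => max (d.getD (PySem.Int.mod (q.1 + x) k) 0) (dLen k x q)) d h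

theorem dStep_values (k x : Int) (l : List (Int × PySem.Dict Int Int))
    (d : PySem.Dict Int Int) (hl : ∀ q ∈ l, ∀ v ∈ q.2.values, 1 ≤ v)
    (hd : ∀ v ∈ d.values, 2 ≤ v) :
    ∀ v ∈ (l.foldl (dStep k x) d).values, 2 ≤ v := by
  induction l generalizing d with
  | nil => exact hd
  | cons q t ih =>
    simp only [List.foldl_cons]
    refine ih (dStep k x d q) (fun q' hq' => hl q' (List.mem_cons_of_mem _ hq')) ?_
    intro v hv
    unfold dStep at hv
    rcases PySem.Dict.mem_values_insert _ _ _ _ hv with hveq | hvold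
    · have h1 : 1 ≤ q.2.getD (PySem.Int.mod (q.1 + x) k) 1 :=
        getD1_ge_one q.2 (hl q (by simp)) _
      rw [dLen_eq] at hveq
      have := le_max_right (d.getD (PySem.Int.mod (q.1 + x) k) 0)
        (q.2.getD (PySem.Int.mod (q.1 + x) k) 1 + 1)
      omega
    · exact hd v hvold
theorem dStep_getD (k x : Int) (l : List (Int × PySem.Dict Int Int))
    (d : PySem.Dict Int Int) (hl : ∀ q ∈ l, ∀ v ∈ q.2.values, 1 ≤ v)
    (hd : ∀ r', 1 ≤ d.getD r' 1) (r : Int) :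
    (l.foldl (dStep k x) d).getD r 1
      = (l.filter (fun q => PySem.Int.mod (q.1 + x) k == r)).foldl
          (fun a q => max a (q.2.getD r 1 + 1)) (d.getD r 1) := by
  induction l generalizing d with
  | nil => simp
  | cons q t ih =>
    have hq1 : 1 ≤ q.2.getD (PySem.Int.mod (q.1 + x) k) 1 :=
      getD1_ge_one q.2 (hl q (by simp)) _
    have hstep : ∀ r', (dStep k x d q).getD r' 1
        = if r' = PySem.Int.mod (q.1 + x) k
          then max (d.getD r' 1) (q.2.getD r' 1 + 1)
          else d.getD r' 1 := by
      intro r'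
      unfold dStep
      by_cases hr : r' = PySem.Int.mod (q.1 + x) k
    
      · rw [if_pos hr, hr, PySem.Dict.getD_insert_self, dLen_eq]
        rw [PySem.Dict.getD_eq_get?_getD d (PySem.Int.mod (q.1 + x) k) 0,
            PySem.Dict.getD_eq_get?_getD d (PySem.Int.mod (q.1 + x) k) 1]
        cases hg : d.get? (PySem.Int.mod (q.1 + x) k) with
        | none => simp only [Option.getD_none]; omega
        | some w => simp
      · rw [if_neg hr, PySem.Dict.getD_insert_of_ne _ _ _ hr]
    have hd' : ∀ r', 1 ≤ (dStep k x d q).getD r' 1 := by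
      intro r'
      rw [hstep r']
      split_ifs with hr
      · have := hd r'
        have := le_max_left (d.getD r' 1) (q.2.getD r' 1 + 1)
        omega
      · exact hd r'
    simp only [List.foldl_cons]
    rw [ih (dStep k x d q) (fun q' hq' => hl q' (List.mem_cons_of_mem _ hq')) hd']
    by_cases hf : PySem.Int.mod (q.1 + x) k = r
    · rw [List.filter_cons_of_pos (by simpa using hf)]
      simp only [List.foldl_cons]
      rw [hstep r, if_pos hf.symm]
    · rw [List.filter_cons_of_neg (by simpa using hf)]
      rw [hstep r, if_neg (fun h => hf h.symm)]
theorem mInner_snd (k x : Int) (l : List (Int × PySem.Dict Int Int))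
    (di : PySem.Dict Int Int) (mx : Int)
    (hl : ∀ q ∈ l, ∀ v ∈ q.2.values, 1 ≤ v)
    (hd : dsup di ≤ mx) (hnd : di.keys.Nodup) (hdv : ∀ v ∈ di.values, 2 ≤ v) :
    (l.foldl (mInner k x) (di, mx)).2 = max mx (dsup (l.foldl (dStep k x) di)) := by
  induction l generalizing di mx with
  | nil =>
    simp only [List.foldl_nil]
    omega
  | cons q t ih =>
    have hq1 : 1 ≤ q.2.getD (PySem.Int.mod (q.1 + x) k) 1 :=
      getD1_ge_one q.2 (fun v hv => by have := hl q (by simp) v hv; omega) _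
    have hnv2 : 2 ≤ max (di.getD (PySem.Int.mod (q.1 + x) k) 0) (dLen k x q) := by
      rw [dLen_eq]
      have := le_max_right (di.getD (PySem.Int.mod (q.1 + x) k) 0)
        (q.2.getD (PySem.Int.mod (q.1 + x) k) 1 + 1)
      omega
    set rem := PySem.Int.mod (q.1 + x) k with hrem
    set nv := max (di.getD rem 0) (dLen k x q) with hnv
    have hstep1 : mInner k x (di, mx) q = (di.insert rem nv, max mx nv) := rfl
    have hdstep : dStep k x di q = di.insert rem nv := rfl
    have hsup : dsup (di.insert rem nv) = max (dsup di) nv :=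
      dsup_insert di hnd rem nv (le_max_left _ _)
    simp only [List.foldl_cons]
    rw [hstep1, hdstep]
    rw [ih (di.insert rem nv) (max mx nv) (fun q' hq' => hl q' (List.mem_cons_of_mem _ hq'))
        (by rw [hsup]; omega)
        (PySem.Dict.nodup_keys_insert di rem nv hnd)
        (by
          intro v hv
          rcases PySem.Dict.mem_values_insert _ _ _ _ hv with hveq | hvold
          · omega
          · exact hdv v hvold)]
    set T := t.foldl (dStep k x) (di.insert rem nv) with hT
    have hmono : nv ≤ T.getD rem 0 := by
      have := dStep_getD0_mono k x t (di.insert rem nv) rem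
      rw [PySem.Dict.getD_insert_self] at this
      rw [hT]
      exact this
    have hle : T.getD rem 0 ≤ dsup T := by
      rw [PySem.Dict.getD_eq_get?_getD]
      cases hg : T.get? rem with
      | none =>
        simp only [Option.getD_none]
        have := one_le_vsup T.values
        unfold dsup
        omega
      | some w =>
        simp only [Option.getD_some]
        exact mem_le_vsup (value_of_get? _ hg)
    omega
-- ---- B inner-loop lemmas ----
theorem innerB_values (k m p : Int) (best : PySem.Dict (Int × Int) Int)
    (hv : ∀ v ∈ best.values, 2 ≤ v) : ∀ v ∈ (pvInnerB k m best p).values, 2 ≤ v := by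
  intro v hmem
  unfold pvInnerB at hmem
  simp only at hmem
  split_ifs at hmem with hlt
  · rcases PySem.Dict.mem_values_insert _ _ _ _ hmem with hveq | hvold
    · have h1 : 1 ≤ best.getD (PySem.Int.mod (p + m) k, p) 1 :=
        getD1_ge_one best (fun w hw => by have := hv w hw; omega) _
      omega
    · exact hv v hvold
  · exact hv v hmem

theorem innerB_nodup (k m p : Int) (best : PySem.Dict (Int × Int) Int)
    (h : best.keys.Nodup) : (pvInnerB k m best p).keys.Nodup := by
  unfold pvInnerB
  simp only
  split_ifs with hlt
  · exact PySem.Dict.nodup_keys_insert _ _ _ h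
  · exact h

theorem innerB_getD (k m p : Int) (best : PySem.Dict (Int × Int) Int)
    (hv : ∀ v ∈ best.values, 2 ≤ v) (r p' : Int) :
    (pvInnerB k m best p).getD (r, p') 1
      = if r = PySem.Int.mod (p + m) k ∧ p' = m
        then max (best.getD (r, m) 1) (best.getD (r, p) 1 + 1)
        else best.getD (r, p') 1 := by
  have h1 : ∀ key, 1 ≤ best.getD key 1 :=
    getD1_ge_one best (fun w hw => by have := hv w hw; omega)
  set rem := PySem.Int.mod (p + m) k with hrem
  have hcand2 : 2 ≤ best.getD (rem, p) 1 + 1 := by have := h1 (rem, p); omega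
  unfold pvInnerB
  simp only [← hrem]
  split_ifs with hlt hcond hcond
  · -- inserted, condition true: (r, p') = (rem, m)
    have hkey : (r, p') = (rem, m) := by rw [hcond.1, hcond.2]
    rw [hkey, PySem.Dict.getD_insert_self]
    have hle : best.getD (rem, m) 1 ≤ best.getD (rem, p) 1 + 1 := by
      rw [PySem.Dict.getD_eq_get?_getD best (rem, m) 0] at hlt
      rw [PySem.Dict.getD_eq_get?_getD best (rem, m) 1]
      cases hg : best.get? (rem, m) with
      | none => simp only [Option.getD_none]; omega
      | some w => rw [hg] at hlt; simp only [Option.getD_some] at hlt ⊢; omega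
    rw [hcond.1, hcond.2] at *
    omega
  · -- inserted, condition false: key differs
    have hne : (r, p') ≠ (rem, m) := by
      intro hkey
      exact hcond ⟨congrArg Prod.fst hkey, congrArg Prod.snd hkey⟩
    rw [PySem.Dict.getD_insert_of_ne _ _ _ hne]
  · -- not inserted, condition true
    have hge : best.getD (rem, m) 0 ≥ best.getD (rem, p) 1 + 1 := by omega
    have hcont : 2 ≤ best.getD (rem, m) 0 := by omega
    have heq01 : best.getD (rem, m) 0 = best.getD (rem, m) 1 := by
      rw [PySem.Dict.getD_eq_get?_getD best (rem, m) 0] at hcont ⊢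
      rw [PySem.Dict.getD_eq_get?_getD best (rem, m) 1]
      cases hg : best.get? (rem, m) with
      | none => rw [hg] at hcont; simp at hcont
      | some w => simp
    rw [hcond.1, hcond.2]
    omega
  · rfl

theorem innerBfold_values (k m : Int) (l : List Int) (best : PySem.Dict (Int × Int) Int)
    (hv : ∀ v ∈ best.values, 2 ≤ v) : ∀ v ∈ (l.foldl (pvInnerB k m) best).values, 2 ≤ v := by
  induction l generalizing best with
  | nil => exact hv
  | cons p t ih => exact ih _ (innerB_values k m p best hv)

theorem innerBfold_nodup (k m : Int) (l : List Int) (best : PySem.Dict (Int × Int) Int)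
    (h : best.keys.Nodup) : (l.foldl (pvInnerB k m) best).keys.Nodup := by
  induction l generalizing best with
  | nil => exact h
  | cons p t ih => exact ih _ (innerB_nodup k m p best h)

theorem innerBfold_getD (k m : Int) (hk : k ≠ 0) (l : List Int)
    (best : PySem.Dict (Int × Int) Int) (hnd : l.Nodup)
    (hcan : ∀ p ∈ l, PySem.Int.mod p k = p) (hv : ∀ v ∈ best.values, 2 ≤ v) (r p' : Int) :
    (l.foldl (pvInnerB k m) best).getD (r, p') 1
      = if p' = m ∧ ∃ p ∈ l, PySem.Int.mod (p + m) k = r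
        then max (best.getD (r, m) 1) (best.getD (r, PySem.Int.mod (r - m) k) 1 + 1)
        else best.getD (r, p') 1 := by
  induction l generalizing best with
  | nil =>
    simp only [List.foldl_nil, List.not_mem_nil]
    rw [if_neg (by rintro ⟨_, p, hp, _⟩; simp at hp)]
  | cons p0 rest ih =>
    rcases List.nodup_cons.mp hnd with ⟨hp0nr, hndr⟩
    have hcanr : ∀ p ∈ rest, PySem.Int.mod p k = p :=
      fun p hp => hcan p (List.mem_cons_of_mem _ hp)
    have hcan0 : PySem.Int.mod p0 k = p0 := hcan p0 (by simp)
    simp only [List.foldl_cons]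
    rw [ih (pvInnerB k m best p0) hndr hcanr (innerB_values k m p0 best hv)]
    by_cases hC : p' = m ∧ ∃ p ∈ rest, PySem.Int.mod (p + m) k = r
    · obtain ⟨hpm, pw, hpw, hpwr⟩ := hC
      have hprw : pw = PySem.Int.mod (r - m) k := pmod_unique hk (hcanr pw hpw) hpwr
      have hrne : ¬ r = PySem.Int.mod (p0 + m) k := by
        intro hr
        have : p0 = PySem.Int.mod (r - m) k := pmod_unique hk hcan0 hr.symm
        exact hp0nr (by rw [this, ← hprw]; exact hpw)
      rw [if_pos ⟨hpm, pw, hpw, hpwr⟩]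
      rw [if_pos ⟨hpm, pw, List.mem_cons_of_mem _ hpw, hpwr⟩]
      rw [innerB_getD k m p0 best hv r m, if_neg (fun h => hrne h.1)]
      rw [innerB_getD k m p0 best hv r (PySem.Int.mod (r - m) k),
          if_neg (fun h => hrne h.1)]
    · rw [if_neg hC]
      rw [innerB_getD k m p0 best hv r p']
      by_cases hB : r = PySem.Int.mod (p0 + m) k ∧ p' = m
      · rw [if_pos hB]
        have hp0r : PySem.Int.mod (p0 + m) k = r := hB.1.symm
        have hpr0 : p0 = PySem.Int.mod (r - m) k := pmod_unique hk hcan0 hp0r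
        rw [if_pos ⟨hB.2, p0, by simp, hp0r⟩, ← hpr0]
      · rw [if_neg hB]
        rw [if_neg (by
          rintro ⟨hm', p, hp, hpr⟩
          rcases List.mem_cons.mp hp with h0 | hrest
          · exact hB ⟨by rw [h0] at hpr; exact hpr.symm, hm'⟩
          · exact hC ⟨hm', p, hrest, hpr⟩)]

-- ---- bridge: port A equals the model ----
theorem list_getD_append_len {α : Type} (l t : List α) (a d : α) :
    (l ++ a :: t).getD l.length d = a := by
  rw [List.getD_eq_getElem _ _ (by simp)]
  simp
theorem list_set_append_len {α : Type} (l t : List α) (a v : α) :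
    (l ++ a :: t).set l.length v = l ++ v :: t := by
  induction l with
  | nil => rfl
  | cons b r ih =>
    simp only [List.cons_append, List.length_cons, List.set_cons_succ]
    rw [ih]
theorem innerA_bridge (nums : List Int) (k cur : Int) (ds tail : List (PySem.Dict Int Int))
    (mx : Int) (di : PySem.Dict Int Int) (hds : ds.length ≤ nums.length) :
    ∀ t : Nat, t ≤ ds.length →
    (PySem.List.pyRange 0 (t : Int)).foldl (pvInnerA nums k (ds.length : Int) cur)
        (ds ++ di :: tail, mx)
      = (ds ++ (((nums.take t).zip (ds.take t)).foldl (mInner k cur) (di, mx)).1 :: tail,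
         (((nums.take t).zip (ds.take t)).foldl (mInner k cur) (di, mx)).2) := by
  intro t
  induction t with
  | zero =>
    intro _
    simp
  | succ t iht =>
    intro hts
    have ht : t ≤ ds.length := Nat.le_of_succ_le hts
    have hdt : t < ds.length := hts
    have hnt : t < nums.length := lt_of_lt_of_le hdt hds
    have hcast : ((t + 1 : Nat) : Int) = (t : Int) + 1 := by push_cast; ring
    rw [hcast, PySem.List.pyRange_one_succ_right (by positivity), List.foldl_append, iht ht]
    simp only [List.foldl_cons, List.foldl_nil]
    have e1 : nums.take (t + 1) = nums.take t ++ [nums[t]] := by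
      rw [List.take_add_one]
      simp [List.getElem?_eq_getElem hnt]
    have e2 : ds.take (t + 1) = ds.take t ++ [ds[t]] := by
      rw [List.take_add_one]
      simp [List.getElem?_eq_getElem hdt]
    have hlen : (nums.take t).length = (ds.take t).length := by
      simp only [List.length_take]
      omega
    rw [e1, e2, List.zip_append hlen, List.foldl_append]
    simp only [List.zip_cons_cons, List.zip_nil_left, List.foldl_cons, List.foldl_nil]
    set st := ((nums.take t).zip (ds.take t)).foldl (mInner k cur) (di, mx) with hst
    have g1 : PySem.List.pyGetD nums (t : Int) 0 = nums[t] := by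
      rw [PySem.List.pyGetD_natCast, List.getD_eq_getElem _ _ hnt]
    have g2 : PySem.List.pyGetD (ds ++ st.1 :: tail) (t : Int) PySem.Dict.empty = ds[t] := by
      rw [PySem.List.pyGetD_natCast, List.getD_append _ _ _ t hdt, List.getD_eq_getElem _ _ hdt]
    have g3 : PySem.List.pyGetD (ds ++ st.1 :: tail) ((ds.length : Nat) : Int)
        PySem.Dict.empty = st.1 := by
      rw [PySem.List.pyGetD_natCast]
      exact list_getD_append_len ds tail st.1 PySem.Dict.empty
    show pvInnerA nums k (ds.length : Int) cur (ds ++ st.1 :: tail, st.2) (t : Int)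
      = (ds ++ (mInner k cur st (nums[t], ds[t])).1 :: tail, (mInner k cur st (nums[t], ds[t])).2)
    unfold pvInnerA mInner
    simp only [g1, g2, g3, Int.toNat_natCast, list_set_append_len]

theorem mPairs_fst (k : Int) (xs : List Int) : (mPairs k xs).map Prod.fst = xs := by
  induction xs using List.reverseRecOn with
  | nil => rfl
  | append_singleton xs x ih =>
    unfold mPairs at ih ⊢
    rw [List.foldl_append]
    simp only [List.foldl_cons, List.foldl_nil]
    set st := xs.foldl (mOuter k) ([], 1) with hstdef
    show ((mOuter k st x).1).map Prod.fst = xs ++ [x]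
    unfold mOuter
    simp only [List.map_append, List.map_cons, List.map_nil]
    rw [ih]

theorem mPairs_length (k : Int) (xs : List Int) : (mPairs k xs).length = xs.length := by
  have := mPairs_fst k xs
  have h := congrArg List.length this
  simpa using h

theorem mPairs_append (k : Int) (xs : List Int) (x : Int) :
    mPairs k (xs ++ [x]) = mPairs k xs ++ [(x, (mPairs k xs).foldl (dStep k x) PySem.Dict.empty)] := by
  unfold mPairs
  rw [List.foldl_append]
  simp only [List.foldl_cons, List.foldl_nil]
  set st := xs.foldl (mOuter k) ([], 1) with hstdef
  show (mOuter k st x).1 = st.1 ++ [(x, st.1.foldl (dStep k x) PySem.Dict.empty)]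
  unfold mOuter
  simp only
  rw [mInner_fst]

theorem mMax_append (k : Int) (xs : List Int) (x : Int) :
    mMax k (xs ++ [x]) = ((mPairs k xs).foldl (mInner k x) (PySem.Dict.empty, mMax k xs)).2 := by
  unfold mMax mPairs
  rw [List.foldl_append]
  simp only [List.foldl_cons, List.foldl_nil]
  rfl

theorem outerA_bridge (nums : List Int) (k : Int) :
    ∀ t, t ≤ nums.length →
    (PySem.List.pyRange 0 (t : Int)).foldl (pvOuterA nums k)
        (List.replicate nums.length (PySem.Dict.empty : PySem.Dict Int Int), 1)
      = ((mPairs k (nums.take t)).map Prod.snd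
           ++ List.replicate (nums.length - t) PySem.Dict.empty,
         mMax k (nums.take t)) := by
  intro t
  induction t with
  | zero =>
    intro _
    simp [mPairs, mMax]
  | succ t iht =>
    intro hts
    have ht : t ≤ nums.length := Nat.le_of_succ_le hts
    have hnt : t < nums.length := hts
    have hcast : ((t + 1 : Nat) : Int) = (t : Int) + 1 := by push_cast; ring
    rw [hcast, PySem.List.pyRange_one_succ_right (by positivity), List.foldl_append, iht ht]
    simp only [List.foldl_cons, List.foldl_nil]
    set ds := (mPairs k (nums.take t)).map Prod.snd with hds
    have hdsl : ds.length = t := by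
      rw [hds]
      simp [mPairs_length, List.length_take]
      omega
    have hrep : List.replicate (nums.length - t) (PySem.Dict.empty : PySem.Dict Int Int)
        = PySem.Dict.empty :: List.replicate (nums.length - (t + 1)) PySem.Dict.empty := by
      rw [show nums.length - t = (nums.length - (t + 1)) + 1 by omega, List.replicate_succ]
    have g1 : PySem.List.pyGetD nums (t : Int) 0 = nums[t] := by
      rw [PySem.List.pyGetD_natCast, List.getD_eq_getElem _ _ hnt]
    unfold pvOuterA
    simp only [g1]
    rw [hrep]
    rw [show ((t : Nat) : Int) = ((ds.length : Nat) : Int) by rw [hdsl]]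
    rw [innerA_bridge nums k nums[t] ds (List.replicate (nums.length - (t + 1)) PySem.Dict.empty)
        (mMax k (nums.take t)) PySem.Dict.empty (by omega) ds.length (le_refl _)]
    have h1 : List.take ds.length nums = List.take t nums := by rw [hdsl]
    rw [h1, List.take_length]
    have hzip : (nums.take t).zip ds = mPairs k (nums.take t) := by
      rw [hds]
      exact (List.zip_of_prod (mPairs_fst k (nums.take t)) rfl).symm
    rw [hzip]
    have e1 : nums.take (t + 1) = nums.take t ++ [nums[t]] := by
      rw [List.take_add_one]
      simp [List.getElem?_eq_getElem hnt]
    rw [e1, mPairs_append, mMax_append, mInner_fst]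
    simp [List.append_assoc, hds]

theorem A_eq_model (nums : List Int) (k : Int) :
    longestValidSubsequence nums k = mMax k nums := by
  have hdp0 : (PySem.List.pyRange 0 (nums.length : Int)).map
      (fun _ => (PySem.Dict.empty : PySem.Dict Int Int))
      = List.replicate nums.length PySem.Dict.empty := by
    rw [PySem.List.pyRange_zero_natCast, List.map_map, List.eq_replicate_iff]
    simp
  have hport : longestValidSubsequence nums k
      = ((PySem.List.pyRange 0 (nums.length : Int)).foldl (pvOuterA nums k)
          ((PySem.List.pyRange 0 (nums.length : Int)).map
            (fun _ => (PySem.Dict.empty : PySem.Dict Int Int)), 1)).2 := rfl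
  rw [hport, hdp0, outerA_bridge nums k nums.length (le_refl _), List.take_length]
-- ---- B-side prefix step lemmas ----
theorem bBest_append (k : Int) (xs : List Int) (x : Int) :
    bBest k (xs ++ [x]) = (bSeen k xs).foldl (pvInnerB k (PySem.Int.mod x k)) (bBest k xs) := by
  unfold bBest bSeen
  rw [List.foldl_append]
  rfl

theorem bSeen_append (k : Int) (xs : List Int) (x : Int) :
    bSeen k (xs ++ [x]) = PySem.Set.add (bSeen k xs) (PySem.Int.mod x k) := by
  unfold bSeen
  rw [List.foldl_append]
  rfl

-- ---- further helpers for the invariant ----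
theorem pmod_shift (k x y : Int) (hk : k ≠ 0) :
    PySem.Int.mod (PySem.Int.mod y k + PySem.Int.mod x k) k = PySem.Int.mod (y + x) k := by
  calc PySem.Int.mod (PySem.Int.mod y k + PySem.Int.mod x k) k
      = PySem.Int.mod (y + PySem.Int.mod x k) k := pmod_add_left k y _ hk
    _ = PySem.Int.mod (PySem.Int.mod x k + y) k := by rw [add_comm]
    _ = PySem.Int.mod (x + y) k := pmod_add_left k x y hk
    _ = PySem.Int.mod (y + x) k := by rw [add_comm]

theorem vsup_le (l : List Int) (m : Int) (h1 : 1 ≤ m) (h : ∀ v ∈ l, v ≤ m) : vsup l ≤ m := by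
  rcases PySem.List.foldl_max_mem l 1 with he | hm
  · unfold vsup
    rw [he]
    exact h1
  · exact h _ hm

theorem bval_append (k : Int) (pairs : List (Int × PySem.Dict Int Int))
    (x : Int) (di : PySem.Dict Int Int) (r p' : Int) :
    bval k (pairs ++ [(x, di)]) r p'
      = if PySem.Int.mod x k = p' then max (bval k pairs r p') (di.getD r 1)
        else bval k pairs r p' := by
  unfold bval
  rw [List.filter_append]
  by_cases h : PySem.Int.mod x k = p'
  · rw [if_pos h]
    rw [show [(x, di)].filter (fun q => PySem.Int.mod q.1 k == p') = [(x, di)] by simp [h]]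
    rw [List.foldl_append]
    simp only [List.foldl_cons, List.foldl_nil]
  · rw [if_neg h]
    rw [show [(x, di)].filter (fun q => PySem.Int.mod q.1 k == p') = [] by simp [h]]
    rw [List.append_nil]

-- ---- the invariant ----
theorem pvInv_holds (k : Int) (hk : k ≠ 0) : ∀ xs : List Int, pvInv k xs := by
  intro xs
  induction xs using List.reverseRecOn with
  | nil =>
    refine ⟨rfl, rfl, fun r p => rfl, rfl, ?_, ?_, ?_⟩
    · intro q hq
      rw [show mPairs k [] = [] from rfl] at hq
      simp at hq
    · intro v hv
      rw [show (bBest k []).values = [] from rfl] at hv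
      simp at hv
    · exact List.nodup_nil
  | append_singleton xs x ih =>
    obtain ⟨ha, hb, hc, hd, he, hf, hg⟩ := ih
    set m := PySem.Int.mod x k with hm
    set pairs := mPairs k xs with hpairs
    set best := bBest k xs with hbest
    set seen := bSeen k xs with hseen
    have hseen_nodup : seen.Nodup := by rw [hb]; exact PySem.Set.nodup_ofList _
    have hseen_canon : ∀ p ∈ seen, PySem.Int.mod p k = p := by
      intro p hp
      rw [hb] at hp
      rcases List.mem_map.mp ((PySem.Set.mem_ofList _ p).mp hp) with ⟨y, hy, hym⟩
      rw [← hym]; exact pmod_idem k y hk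
    have hseen_iff : ∀ p, p ∈ seen ↔ ∃ y ∈ xs, PySem.Int.mod y k = p := by
      intro p
      rw [hb, PySem.Set.mem_ofList]
      simp [List.mem_map]
    have he1 : ∀ q ∈ pairs, ∀ v ∈ q.2.values, 1 ≤ v :=
      fun q hq v hv => by have := (he q hq).1 v hv; omega
    set di := pairs.foldl (dStep k x) PySem.Dict.empty with hdi
    have hdi_getD : ∀ r, di.getD r 1
        = (pairs.filter (fun q => PySem.Int.mod (q.1 + x) k == r)).foldl
            (fun a q => max a (q.2.getD r 1 + 1)) 1 := by
      intro r
      rw [hdi, dStep_getD k x pairs PySem.Dict.empty he1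
        (fun r' => by rw [PySem.Dict.getD_empty]), PySem.Dict.getD_empty]
    have hdi_nodup : di.keys.Nodup := dStep_nodup k x pairs _ PySem.Dict.nodup_keys_empty
    have hdi_vals : ∀ v ∈ di.values, 2 ≤ v := by
      refine dStep_values k x pairs _ he1 ?_
      intro v hv
      rw [show (PySem.Dict.empty : PySem.Dict Int Int).values = [] from rfl] at hv
      simp at hv
    have hq_key : ∀ q : Int × PySem.Dict Int Int,
        PySem.Int.mod (PySem.Int.mod q.1 k + m) k = PySem.Int.mod (q.1 + x) k := by
      intro q
      rw [hm, pmod_shift k x q.1 hk]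
    have hgroup_iff : ∀ r, (∃ p ∈ seen, PySem.Int.mod (p + m) k = r)
        ↔ (∃ q ∈ pairs, PySem.Int.mod (q.1 + x) k = r) := by
      intro r
      constructor
      · rintro ⟨p, hp, hpr⟩
        rcases (hseen_iff p).mp hp with ⟨y, hy, hym⟩
        have hyp : y ∈ pairs.map Prod.fst := by rw [ha]; exact hy
        rcases List.mem_map.mp hyp with ⟨q, hq, hqy⟩
        refine ⟨q, hq, ?_⟩
        rw [← hq_key q, hqy, hym, hpr]
      · rintro ⟨q, hq, hqr⟩
        refine ⟨PySem.Int.mod q.1 k, ?_, ?_⟩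
        · rw [hseen_iff]
          exact ⟨q.1, by rw [← ha]; exact List.mem_map.mpr ⟨q, hq, rfl⟩, rfl⟩
        · rw [hq_key q, hqr]
    have hfilter_congr : ∀ r, (∃ p ∈ seen, PySem.Int.mod (p + m) k = r) →
        pairs.filter (fun q => PySem.Int.mod (q.1 + x) k == r)
          = pairs.filter (fun q => PySem.Int.mod q.1 k == PySem.Int.mod (r - m) k) := by
      intro r hex
      obtain ⟨p0, hp0, hp0r⟩ := hex
      have hp0c : PySem.Int.mod p0 k = p0 := hseen_canon p0 hp0
      have hp0u : p0 = PySem.Int.mod (r - m) k := pmod_unique hk hp0c hp0r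
      apply List.filter_congr
      intro q hq
      have hqc : PySem.Int.mod (PySem.Int.mod q.1 k) k = PySem.Int.mod q.1 k := pmod_idem k q.1 hk
      have : (PySem.Int.mod (q.1 + x) k = r) ↔ (PySem.Int.mod q.1 k = PySem.Int.mod (r - m) k) := by
        constructor
        · intro h
          exact pmod_unique hk hqc (by rw [hq_key q, h])
        · intro h
          rw [← hq_key q, h, ← hp0u, hp0r]
      by_cases h1 : PySem.Int.mod (q.1 + x) k = r
      · have h2 := this.mp h1
        simp [h1, h2]
      · have h2 : ¬ PySem.Int.mod q.1 k = PySem.Int.mod (r - m) k := fun h2 => h1 (this.mpr h2)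
        simp [h1, h2]
    refine ⟨?_, ?_, ?_, ?_, ?_, ?_, ?_⟩
    · rw [mPairs_append]
      simp only [List.map_append, List.map_cons, List.map_nil]
      rw [ha]
    · have hsingle : PySem.Set.ofList (List.map (fun y => PySem.Int.mod y k) (xs ++ [x]))
          = PySem.Set.add (PySem.Set.ofList (List.map (fun y => PySem.Int.mod y k) xs))
              (PySem.Int.mod x k) := by
        rw [List.map_append, PySem.Set.ofList_eq_foldl, List.foldl_append,
          ← PySem.Set.ofList_eq_foldl]
        rfl
      rw [bSeen_append, ← hseen, hb, hsingle]
    · -- dictionary correspondence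
      intro r p'
      rw [bBest_append, mPairs_append]
      rw [← hm, ← hseen, ← hbest, ← hpairs, ← hdi]
      rw [innerBfold_getD k m hk seen best hseen_nodup hseen_canon hf r p']
      rw [bval_append]
      by_cases hpm : p' = m
      · have hcond2 : PySem.Int.mod x k = p' := by rw [← hm, hpm]
        rw [if_pos hcond2]
        subst hpm
        by_cases hex : ∃ p ∈ seen, PySem.Int.mod (p + m) k = r
        · rw [if_pos (show m = m ∧ ∃ p ∈ seen, PySem.Int.mod (p + m) k = r from ⟨rfl, hex⟩)]
          rw [hc r m, hc r (PySem.Int.mod (r - m) k)]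
          have hdival : di.getD r 1 = bval k pairs r (PySem.Int.mod (r - m) k) + 1 := by
            rw [hdi_getD r, hfilter_congr r hex]
            have hne : pairs.filter (fun q => PySem.Int.mod q.1 k == PySem.Int.mod (r - m) k) ≠ [] := by
              obtain ⟨q, hq, hqr⟩ := (hgroup_iff r).mp hex
              have hqmem : q ∈ pairs.filter (fun q => PySem.Int.mod q.1 k == PySem.Int.mod (r - m) k) := by
                rw [← hfilter_congr r hex]
                exact List.mem_filter.mpr ⟨hq, by simp [hqr]⟩
              exact List.ne_nil_of_mem hqmem
            have h01 := foldl_max_add_one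
              (pairs.filter (fun q => PySem.Int.mod q.1 k == PySem.Int.mod (r - m) k))
              (fun q => q.2.getD r 1) 0
            norm_num at h01
            rw [h01, foldl_max_seed _ _ 0 1 (by norm_num)
              (fun q hq => getD1_ge_one q.2 (he1 q (List.mem_of_mem_filter hq)) r) hne]
            rfl
          rw [hdival]
        · rw [if_neg (show ¬ (m = m ∧ ∃ p ∈ seen, PySem.Int.mod (p + m) k = r) from
            fun h => hex h.2)]
          have hempty : pairs.filter (fun q => PySem.Int.mod (q.1 + x) k == r) = [] := by
            rw [List.filter_eq_nil_iff]
            intro q hq hbeq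
            exact hex ((hgroup_iff r).mpr ⟨q, hq, by simpa using hbeq⟩)
          have hdi1 : di.getD r 1 = 1 := by
            rw [hdi_getD r, hempty]
            rfl
          rw [hdi1, hc r m]
          have hb1 : 1 ≤ bval k pairs r m := (PySem.List.le_foldl_max_int _ _ 1).1
          omega
      · rw [if_neg (show ¬ (p' = m ∧ ∃ p ∈ seen, PySem.Int.mod (p + m) k = r) from
          fun hh => hpm hh.1)]
        rw [if_neg (show ¬ (PySem.Int.mod x k = p') from fun h => hpm (hm.trans h).symm)]
        exact hc r p'
    · -- running maximum
      rw [mMax_append, mPairs_append, ← hpairs, ← hdi]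
      have hde : dsup (PySem.Dict.empty : PySem.Dict Int Int) = 1 := rfl
      have hm1 : 1 ≤ mMax k xs := by
        rw [hd]
        exact (PySem.List.le_foldl_max_int _ _ 1).1
      rw [mInner_snd k x pairs PySem.Dict.empty (mMax k xs) he1 (by rw [hde]; omega)
        PySem.Dict.nodup_keys_empty
        (by
          intro v hv
          rw [show (PySem.Dict.empty : PySem.Dict Int Int).values = [] from rfl] at hv
          simp at hv)]
      rw [List.foldl_append]
      simp only [List.foldl_cons, List.foldl_nil]
      rw [hd, hdi]
    · -- per-pair dict invariants
      rw [mPairs_append, ← hpairs, ← hdi]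
      intro q hq
      rcases List.mem_append.mp hq with hold | hnew
      · exact he q hold
      · have : q = (x, di) := by simpa using hnew
        rw [this]
        exact ⟨hdi_vals, hdi_nodup⟩
    · rw [bBest_append, ← hm, ← hseen, ← hbest]
      exact innerBfold_values k m seen best hf
    · rw [bBest_append, ← hm, ← hseen, ← hbest]
      exact innerBfold_nodup k m seen best hg
theorem maxD_eq_vsup (l : List Int) (hv : ∀ v ∈ l, 1 ≤ v) :
    PySem.List.maxD l (fun y => y) 1 = vsup l := by
  cases l with
  | nil => rfl
  | cons a t =>
    unfold PySem.List.maxD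
    rw [PySem.List.max?_id_cons]
    simp only [Option.getD_some]
    have ha : 1 ≤ a := hv a (by simp)
    have h1 : t.foldl max a = t.foldl max (max 1 a) := by
      congr 1
      omega
    rw [h1]
    unfold vsup
    rw [List.foldl_cons]
theorem final_eq (k : Int) (hk : k ≠ 0) (nums : List Int) :
    mMax k nums = vsup (bBest k nums).values := by
  obtain ⟨ha, hb, hc, hd, he, hf, hg⟩ := pvInv_holds k hk nums
  set pairs := mPairs k nums with hpairs
  set best := bBest k nums with hbest
  set V := vsup best.values with hV
  set S := pairs.foldl (fun a q => max a (dsup q.2)) 1 with hS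
  have h1S : 1 ≤ S := (PySem.List.le_foldl_max_int _ _ 1).1
  have h1V : 1 ≤ V := one_le_vsup _
  have hbval_le : ∀ r p, bval k pairs r p ≤ S := by
    intro r p
    apply foldl_max_le _ _ 1 S h1S
    intro q hq
    have hqp : q ∈ pairs := List.mem_of_mem_filter hq
    calc q.2.getD r 1 ≤ dsup q.2 := getD1_le_vsup q.2 r
      _ ≤ S := (PySem.List.le_foldl_max_int pairs (fun q => dsup q.2) 1).2 q hqp
  apply le_antisymm
  · rw [hd]
    apply foldl_max_le _ _ 1 V h1V
    intro q hq
    apply vsup_le _ _ h1V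
    intro v hv
    obtain ⟨r, hr⟩ := values_exists_key q.2 (he q hq).2 hv
    have hle1 : v ≤ bval k pairs r (PySem.Int.mod q.1 k) := by
      rw [← hr]
      unfold bval
      exact (PySem.List.le_foldl_max_int
          (pairs.filter (fun q2 => PySem.Int.mod q2.1 k == PySem.Int.mod q.1 k))
          (fun q2 => q2.2.getD r 1) 1).2 q
        (List.mem_filter.mpr ⟨hq, by exact beq_self_eq_true (PySem.Int.mod q.1 k)⟩)
    calc v ≤ bval k pairs r (PySem.Int.mod q.1 k) := hle1
      _ = best.getD (r, PySem.Int.mod q.1 k) 1 := (hc r (PySem.Int.mod q.1 k)).symm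
      _ ≤ V := getD1_le_vsup best _
  · rw [hd]
    apply vsup_le _ _ h1S
    intro v hv
    obtain ⟨key, hkey⟩ := values_exists_key best hg hv
    have : best.getD key 1 = bval k pairs key.1 key.2 := by
      have := hc key.1 key.2
      simpa using this
    rw [← hkey, this]
    exact hbval_le key.1 key.2
-- ===== VERDICT (by name: the statement is the Claim_ definition above) =====
theorem longestValidSubsequence_spec : Claim_equal_longestValidSubsequence := by
  intro nums k _ hpre
  unfold Spec_longestValidSubsequence
  have hk : k ≠ 0 := hpre
  rw [A_eq_model, final_eq k hk nums]
  unfold longestValidSubsequence_alt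
  rw [maxD_eq_vsup]
  · rfl
  · intro v hv
    have h2 := ((pvInv_holds k hk nums).2.2.2.2.2.1) v hv
    omega
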